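-- pv_equiv track=rewrite | github.com/jonasRower/myW3schools | prepareData/json html/Python cssJson/python/jsonMain.py | ziskejRunJs
-- ===== SOURCE A (Python) =====
-- def ziskejRunJs(nazevSouboruProGen):
--
--     runJs = ''
--     nazevSouboruProGenSpl = nazevSouboruProGen.split('_')
--     for i in range(1, len(nazevSouboruProGenSpl)):
--         slozka = nazevSouboruProGenSpl[i]
--         runJs = runJs + slozka
--         if(i < len(nazevSouboruProGenSpl)-1):
--             runJs = runJs + '_'
--
--     runJs = runJs + '.js'
--
--     return(runJs)
-- ===== SOURCE B (Python) =====
-- def ziskejRunJs(nazevSouboruProGen):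
--     return nazevSouboruProGen.partition('_')[2] + '.js'
-- ===== Notes on version B (the rewrite author's own statement) =====
-- stated objective: idiomatic
-- what changed: Replaces the split('_') + index loop that re-joins the tail parts with '_' by a single str.partition('_') call taking the part after the first separator.
import Mathlib
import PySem

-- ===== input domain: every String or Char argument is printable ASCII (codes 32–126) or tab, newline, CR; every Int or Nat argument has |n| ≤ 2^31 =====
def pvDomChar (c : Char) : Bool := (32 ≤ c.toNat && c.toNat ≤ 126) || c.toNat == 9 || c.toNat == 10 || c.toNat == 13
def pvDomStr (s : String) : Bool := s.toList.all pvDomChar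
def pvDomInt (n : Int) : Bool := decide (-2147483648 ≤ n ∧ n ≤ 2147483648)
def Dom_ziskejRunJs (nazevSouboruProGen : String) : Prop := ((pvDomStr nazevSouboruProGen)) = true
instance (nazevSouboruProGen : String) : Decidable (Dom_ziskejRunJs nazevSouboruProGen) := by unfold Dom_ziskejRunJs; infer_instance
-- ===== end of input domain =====

-- B replaces A's split('_') + index loop rebuilding the tail with an idiomatic
-- partition('_')[2] + '.js' (same cost, plainer code).


-- ===== PORT A =====
-- literal port of A: split on '_', then for i in range(1, len(spl)) append spl[i]
-- and a '_' separator except after the last part; finally append '.js'.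
-- The port works on List Char (PySem.Chars is the exact string model); spl[i] is
-- always in range inside the loop, so pyGet? never yields none there.
def ziskejRunJs (nazevSouboruProGen : String) : String :=
  let runJs : List Char := []
  let spl := PySem.Chars.splitOn nazevSouboruProGen.toList ['_']
  let n : Int := spl.length
  let runJs :=
    (PySem.List.pyRange 1 n 1).foldl
      (fun r i =>
        let slozka := (PySem.List.pyGet? spl i).getD []
        let r := r ++ slozka
        if i < n - 1 then r ++ ['_'] else r)
      runJs
  String.ofList (runJs ++ ".js".toList)

-- ===== PORT B =====
-- literal port of B: nazevSouboruProGen.partition('_')[2] + '.js'.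
-- partition('_')[2] is the suffix after the FIRST '_' ('' when there is none);
-- PySem has no partition, so it is ported by hand on List Char: drop up to and
-- including the first '_' (exact on every input).
def ziskejRunJs_alt (nazevSouboruProGen : String) : String :=
  let tail :=
    match nazevSouboruProGen.toList.dropWhile (· ≠ '_') with
    | [] => []
    | _ :: r => r
  String.ofList (tail ++ ".js".toList)

-- ===== PRECONDITION & SPEC =====
def Spec_ziskejRunJs (nazevSouboruProGen : String) (out : String) : Prop := out = ziskejRunJs_alt nazevSouboruProGen
instance (nazevSouboruProGen : String) (out : String) : Decidable (Spec_ziskejRunJs nazevSouboruProGen out) := by unfold Spec_ziskejRunJs; infer_instance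

-- ===== CLAIM (what is proved, stated in full; the proofs are below) =====
def Claim_equal_ziskejRunJs : Prop := ∀ (nazevSouboruProGen : String), Dom_ziskejRunJs nazevSouboruProGen → Spec_ziskejRunJs nazevSouboruProGen (ziskejRunJs nazevSouboruProGen)

-- ===== LEMMAS AND PROOFS =====

-- A structural model of s.split('_') (single-char separator).
def mySplit : List Char → List (List Char)
  | [] => [[]]
  | c :: r => if c = '_' then [] :: mySplit r else (mySplit r).modifyHead (c :: ·)

lemma mySplit_ne_nil (cs : List Char) : mySplit cs ≠ [] := by
  induction cs with
  | nil => simp [mySplit]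
  | cons c r ih =>
    simp only [mySplit]
    split
    · simp
    · cases h : mySplit r with
      | nil => exact absurd h ih
      | cons p ps => simp [List.modifyHead]

lemma go_spec : ∀ (fuel : Nat) (l cur : List Char) (acc : List (List Char)), l.length ≤ fuel →
    PySem.Chars.splitOn.go ['_'] fuel l cur acc
      = acc.reverse ++ (mySplit l).modifyHead (cur.reverse ++ ·) := by
  intro fuel
  induction fuel with
  | zero =>
    intro l cur acc h
    have hl : l = [] := List.eq_nil_of_length_eq_zero (Nat.le_zero.mp h)
    subst hl
    simp [PySem.Chars.splitOn.go, mySplit]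
  | succ fuel ih =>
    intro l cur acc h
    cases l with
    | nil => simp [PySem.Chars.splitOn.go, mySplit]
    | cons c rest =>
      by_cases hc : c = '_'
      · subst hc
        rw [show PySem.Chars.splitOn.go ['_'] (fuel+1) ('_' :: rest) cur acc
              = PySem.Chars.splitOn.go ['_'] fuel (List.drop 1 ('_' :: rest)) [] (cur.reverse :: acc) by
            simp [PySem.Chars.splitOn.go, List.isPrefixOf]]
        rw [ih _ _ _ (by simpa using Nat.le_of_succ_le_succ h)]
        have : List.modifyHead (fun x => x) (mySplit rest) = mySplit rest := by
          cases mySplit rest <;> rfl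
        simp [mySplit, this]
      · rw [show PySem.Chars.splitOn.go ['_'] (fuel+1) (c :: rest) cur acc
              = PySem.Chars.splitOn.go ['_'] fuel rest (c :: cur) acc by
            simp only [PySem.Chars.splitOn.go, List.isPrefixOf, Bool.and_eq_true, beq_iff_eq]
            rw [if_neg (by simp; intro hEq; exact absurd hEq.symm hc)]]
        rw [ih _ _ _ (Nat.le_of_succ_le_succ h)]
        simp only [mySplit, if_neg hc]
        cases hm : mySplit rest with
        | nil => exact absurd hm (mySplit_ne_nil rest)
        | cons p ps => simp [List.modifyHead]

lemma splitOn_eq_mySplit (cs : List Char) :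
    PySem.Chars.splitOn cs ['_'] = mySplit cs := by
  rw [PySem.Chars.splitOn, go_spec (cs.length + 1) cs [] [] (Nat.le_succ _)]
  cases h : mySplit cs with
  | nil => exact absurd h (mySplit_ne_nil cs)
  | cons p ps => simp [List.modifyHead]

-- '_'.join
def joinU : List (List Char) → List Char
  | [] => []
  | [x] => x
  | x :: y :: ys => x ++ '_' :: joinU (y :: ys)

lemma joinU_mySplit (cs : List Char) : joinU (mySplit cs) = cs := by
  induction cs with
  | nil => simp [mySplit, joinU]
  | cons c r ih =>
    by_cases hc : c = '_'
    · subst hc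
      simp only [mySplit, reduceIte]
      cases hm : mySplit r with
      | nil => exact absurd hm (mySplit_ne_nil r)
      | cons p ps => rw [hm] at ih; simpa [joinU] using ih
    · simp only [mySplit, if_neg hc]
      cases hm : mySplit r with
      | nil => exact absurd hm (mySplit_ne_nil r)
      | cons p ps =>
        rw [hm] at ih
        cases ps with
        | nil => simpa [List.modifyHead, joinU] using congrArg (c :: ·) ih
        | cons q qs => simpa [List.modifyHead, joinU] using congrArg (c :: ·) ih

-- what B computes on the char list
def afterFirst (cs : List Char) : List Char :=
  match cs.dropWhile (· ≠ '_') with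
  | [] => []
  | _ :: r => r

lemma joinU_drop_one_mySplit (cs : List Char) :
    joinU ((mySplit cs).drop 1) = afterFirst cs := by
  induction cs with
  | nil => simp [mySplit, joinU, afterFirst]
  | cons c r ih =>
    by_cases hc : c = '_'
    · subst hc
      simp [mySplit, afterFirst, List.dropWhile, joinU_mySplit]
    · simp only [mySplit, if_neg hc]
      have hdrop : ((mySplit r).modifyHead (c :: ·)).drop 1 = (mySplit r).drop 1 := by
        cases mySplit r <;> simp [List.modifyHead]
      rw [hdrop, ih]
      simp [afterFirst, List.dropWhile, hc]

-- A's loop from index a onward builds '_'.join(spl[a:]) when appended to acc.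
lemma loopA (spl : List (List Char)) :
    ∀ (d a : Nat), spl.length - a ≤ d → a ≤ spl.length → ∀ acc : List Char,
    (PySem.List.pyRange (a : Int) (spl.length : Int) 1).foldl
      (fun r i =>
        if i < (spl.length : Int) - 1 then r ++ (PySem.List.pyGet? spl i).getD [] ++ ['_']
        else r ++ (PySem.List.pyGet? spl i).getD [])
      acc
    = acc ++ joinU (spl.drop a) := by
  intro d
  induction d with
  | zero =>
    intro a hd ha acc
    have : a = spl.length := by omega
    subst this
    rw [PySem.List.pyRange_one_eq_nil (le_refl _)]
    simp [joinU]
  | succ d ih =>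
    intro a hd ha acc
    by_cases he : a = spl.length
    · subst he
      rw [PySem.List.pyRange_one_eq_nil (le_refl _)]
      simp [joinU]
    · have hlt : a < spl.length := lt_of_le_of_ne ha he
      rw [PySem.List.pyRange_one_cons (by exact_mod_cast hlt)]
      rw [List.foldl_cons]
      have hget : (PySem.List.pyGet? spl (a : Int)).getD [] = spl[a] := by
        rw [PySem.List.pyGet?_natCast spl a, List.getElem?_eq_getElem hlt]; rfl
      have : ((a : Int) + 1) = ((a + 1 : Nat) : Int) := by push_cast; ring
      rw [this, ih (a + 1) (by omega) (by omega)]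
      simp only [hget]
      have hdrop : spl.drop a = spl[a] :: spl.drop (a + 1) :=
        List.drop_eq_getElem_cons hlt
      by_cases hlast : a + 1 = spl.length
      · have hc : ¬ ((a : Int) < (spl.length : Int) - 1) := by omega
        have hnil : spl.drop (a + 1) = [] := by
          apply List.drop_eq_nil_of_le; omega
        rw [if_neg hc, hdrop, hnil]
        simp [joinU]
      · have hc : (a : Int) < (spl.length : Int) - 1 := by omega
        have hne : spl.drop (a + 1) ≠ [] := by
          simp [List.drop_eq_nil_iff]; omega
        rw [if_pos hc, hdrop]
        cases hm : spl.drop (a + 1) with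
        | nil => exact absurd hm hne
        | cons p ps => simp [joinU]

-- ===== VERDICT (by name: the statement is the Claim_ definition above) =====
theorem ziskejRunJs_spec : Claim_equal_ziskejRunJs := by
  intro s _
  unfold Spec_ziskejRunJs
  simp only [ziskejRunJs, ziskejRunJs_alt, splitOn_eq_mySplit]
  have h1 : 1 ≤ (mySplit s.toList).length := by
    cases hm : mySplit s.toList with
    | nil => exact absurd hm (mySplit_ne_nil _)
    | cons p ps => simp
  have hl := loopA (mySplit s.toList) (mySplit s.toList).length 1 (by omega) h1 []
  simp only [Nat.cast_one] at hl
  rw [hl, joinU_drop_one_mySplit]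
  rfl
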